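-- pv_equiv track=rewrite | github.com/eric-wieser/codejam | 2017/1C/b/main.py | n_to_exceed
-- ===== SOURCE A (Python) =====
-- def n_to_exceed(vals, lim):
--     vals = sorted(vals, reverse=True)
--     val = 0
--     i = 0
--     while val < lim:
--         val += vals[i]
--         i += 1
--     return i
-- ===== SOURCE B (Python) =====
-- def n_to_exceed(vals, lim):
--     # Selection instead of sorting: repeatedly extract the current maximum
--     # from a working copy until the accumulated value reaches lim.
--     work = list(vals)
--     val = 0
--     i = 0
--     while val < lim:
--         m = max(work)
--         work.remove(m)
--         val += m
--         i += 1
--     return i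
-- ===== Notes on version B (the rewrite author's own statement) =====
-- stated objective: alternative
-- what changed: B never sorts: it keeps a working copy and repeatedly extracts the current maximum (max + remove) until the running sum reaches lim, instead of sorting descending and walking an index.
import Mathlib
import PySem

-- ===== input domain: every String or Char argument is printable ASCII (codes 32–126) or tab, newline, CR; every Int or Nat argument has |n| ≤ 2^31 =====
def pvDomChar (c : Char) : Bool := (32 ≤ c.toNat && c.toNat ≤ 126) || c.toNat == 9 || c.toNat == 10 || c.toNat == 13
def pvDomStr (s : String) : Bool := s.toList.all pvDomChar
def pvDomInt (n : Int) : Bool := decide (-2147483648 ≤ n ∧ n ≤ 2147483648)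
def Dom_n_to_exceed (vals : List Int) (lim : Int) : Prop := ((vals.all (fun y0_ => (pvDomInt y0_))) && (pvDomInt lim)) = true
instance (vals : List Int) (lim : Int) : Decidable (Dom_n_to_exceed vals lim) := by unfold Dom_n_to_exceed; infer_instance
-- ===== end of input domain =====

-- B replaces sort-then-index with repeated max-extraction from a working copy (alternative decomposition, same results).

-- ===== PORT A =====
-- 'while val < lim: val += vals[i]; i += 1' on the descending-sorted list: walking index i
-- down the sorted list is the structural recursion on the remaining suffix.  The '[]' branch
-- with val < lim is Python's IndexError (excluded by Pre_); the port returns 0 there.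
def pvLoopA (lim : Int) : List Int → Int → Int → Int
  | l, val, i =>
    if val < lim then
      match l with
      | [] => 0            -- IndexError in Python; unreachable under Pre_
      | v :: rest => pvLoopA lim rest (val + v) (i + 1)
    else i

def n_to_exceed (vals : List Int) (lim : Int) : Int :=
  pvLoopA lim (PySem.List.sorted vals (fun x => x) true) 0 0

-- ===== PORT B =====
-- 'while val < lim: m = max(work); work.remove(m); val += m; i += 1'.
-- max(work) is PySem.List.max? (ValueError on [] — unreachable under Pre_, port returns i);
-- work.remove(m) with m ∈ work (m comes from max) is List.erase (PySem.List.remove?_eq_some_erase).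
def pvLoopB (lim : Int) (work : List Int) (val i : Int) : Int :=
  if val < lim then
    match h : PySem.List.max? work (fun x => x) with
    | none => i            -- ValueError in Python; unreachable under Pre_
    | some m => pvLoopB lim (work.erase m) (val + m) (i + 1)
  else i
termination_by work.length
decreasing_by
  have hm : m ∈ work := PySem.List.max?_mem h
  have := work.length_erase_of_mem hm
  have : work ≠ [] := by rintro rfl; simp [PySem.List.max?] at h
  have : 0 < work.length := List.length_pos_iff.mpr this
  omega

def n_to_exceed_alt (vals : List Int) (lim : Int) : Int :=
  pvLoopB lim vals 0 0

-- ===== PRECONDITION & SPEC =====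
-- Pre_ excludes exactly the inputs on which Python A raises IndexError (the accumulated sum can
-- never reach lim even taking every positive value); B raises ValueError on the same inputs.
def Pre_n_to_exceed (vals : List Int) (lim : Int) : Prop :=
  lim ≤ 0 ∨ lim ≤ (vals.filter (fun x => 0 < x)).sum
instance (vals : List Int) (lim : Int) : Decidable (Pre_n_to_exceed vals lim) := by
  unfold Pre_n_to_exceed; infer_instance

def pvWitness_n_to_exceed : List Int × Int := ([3, -1, 2, 2], 5)

def Spec_n_to_exceed (vals : List Int) (lim : Int) (out : Int) : Prop := out = n_to_exceed_alt vals lim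
instance (vals : List Int) (lim : Int) (out : Int) : Decidable (Spec_n_to_exceed vals lim out) := by unfold Spec_n_to_exceed; infer_instance

-- ===== CLAIM (what is proved, stated in full; the proofs are below) =====
def Claim_equal_n_to_exceed : Prop := ∀ (vals : List Int) (lim : Int), Dom_n_to_exceed vals lim → Pre_n_to_exceed vals lim → Spec_n_to_exceed vals lim (n_to_exceed vals lim)

-- ===== LEMMAS AND PROOFS =====

-- unfolding lemmas for the two loops
lemma pvLoopA_stop {lim val i : Int} {l : List Int} (h : ¬ val < lim) :
    pvLoopA lim l val i = i := by
  rw [pvLoopA.eq_def]; simp [h]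

lemma pvLoopA_cons {lim val i v : Int} {rest : List Int} (h : val < lim) :
    pvLoopA lim (v :: rest) val i = pvLoopA lim rest (val + v) (i + 1) := by
  rw [pvLoopA.eq_def]; simp [h]

lemma pvLoopB_stop {lim val i : Int} {work : List Int} (h : ¬ val < lim) :
    pvLoopB lim work val i = i := by
  rw [pvLoopB]; simp [h]

lemma pvLoopB_step {lim val i m : Int} {work : List Int} (hv : val < lim)
    (hmax : PySem.List.max? work (fun x => x) = some m) :
    pvLoopB lim work val i = pvLoopB lim (work.erase m) (val + m) (i + 1) := by
  rw [pvLoopB]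
  simp only [hv, if_true]
  split
  · next heq => rw [hmax] at heq; cases heq
  · next m' heq =>
      rw [hmax] at heq
      cases heq
      rfl

-- sum of the positive elements of a list
def pvSumPos (l : List Int) : Int := (l.filter (fun x => 0 < x)).sum

lemma pvSumPos_erase {l : List Int} {m : Int} (hm : m ∈ l) (hpos : 0 < m) :
    pvSumPos (l.erase m) = pvSumPos l - m := by
  have hperm : l.Perm (m :: l.erase m) := List.perm_cons_erase hm
  have h3 : (l.filter (fun x => decide (0 < x))).sum
      = ((m :: l.erase m).filter (fun x => decide (0 < x))).sum := (hperm.filter _).sum_eq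
  unfold pvSumPos
  rw [h3]
  simp [hpos]

lemma pvSumPos_pos_exists {l : List Int} (h : 0 < pvSumPos l) : ∃ x ∈ l, 0 < x := by
  by_contra hno
  push Not at hno
  have : l.filter (fun x => decide (0 < x)) = [] := by
    apply List.filter_eq_nil_iff.mpr
    intro x hx
    simpa using hno x hx
  unfold pvSumPos at h
  rw [this] at h
  simp at h

-- the head of the descending sort is the maximum, and the tail is the descending sort of the erase
lemma pvSortedDesc_step {work : List Int} {m : Int}
    (hmax : PySem.List.max? work (fun x => x) = some m) :
    PySem.List.sorted work (fun x => x) true = m :: PySem.List.sorted (work.erase m) (fun x => x) true := by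
  have hmW : m ∈ work := PySem.List.max?_mem hmax
  have hne : work ≠ [] := by rintro rfl; simp [PySem.List.max?] at hmax
  obtain ⟨a, t, hs⟩ : ∃ a t, PySem.List.sorted work (fun x => x) true = a :: t := by
    cases hsrt : PySem.List.sorted work (fun x => x) true with
    | nil => exact absurd ((PySem.List.sorted_eq_nil_iff _ _ _).mp hsrt) hne
    | cons a t => exact ⟨a, t, rfl⟩
  have hperm : (PySem.List.sorted work (fun x => x) true).Perm work :=
    PySem.List.sorted_perm work _ _
  have haW : a ∈ work := by
    have : a ∈ PySem.List.sorted work (fun x => x) true := by rw [hs]; simp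
    exact hperm.mem_iff.mp this
  have ham : a = m := by
    have h1 : a ≤ m := PySem.List.max?_isMax hmax a haW
    have h2 : m ≤ a := PySem.List.key_head_sorted_rev_ge _ _ hs m hmW
    omega
  subst ham
  rw [hs]
  congr 1
  -- t = sorted (work.erase a) desc : both are descending permutations of work.erase a
  have hpt : t.Perm (work.erase a) := by
    have h1 : (a :: t).Perm work := by rw [← hs]; exact hperm
    have := h1.erase a
    simpa using this
  have hpw : t.Perm (PySem.List.sorted (work.erase a) (fun x => x) true) :=
    hpt.trans (PySem.List.sorted_perm _ _ _).symm
  have hdt : t.Pairwise (fun x y : Int => y ≤ x) := by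
    have := PySem.List.sorted_pairwise_rev work (fun x : Int => x)
    rw [hs] at this
    exact (List.pairwise_cons.mp this).2
  have hds : (PySem.List.sorted (work.erase a) (fun x => x) true).Pairwise
      (fun x y : Int => y ≤ x) :=
    PySem.List.sorted_pairwise_rev _ _
  exact PySem.List.eq_of_perm_of_pairwise_le_of_injective (fun x : Int => -x)
    (fun x y h => by simpa using h) hpw
    (hdt.imp (fun h => by simpa using h)) (hds.imp (fun h => by simpa using h))

-- main loop equivalence, under the invariant lim ≤ val + pvSumPos work
lemma pvLoop_eq (lim : Int) : ∀ n work val i, work.length ≤ n →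
    lim ≤ val + pvSumPos work →
    pvLoopA lim (PySem.List.sorted work (fun x => x) true) val i = pvLoopB lim work val i := by
  intro n
  induction n with
  | zero =>
    intro work val i hlen hinv
    have hw : work = [] := List.eq_nil_of_length_eq_zero (by omega)
    subst hw
    simp only [pvSumPos, List.filter_nil, List.sum_nil, add_zero] at hinv
    have hnv : ¬ val < lim := by omega
    rw [pvLoopA_stop hnv, pvLoopB_stop hnv]
  | succ n ih =>
    intro work val i hlen hinv
    by_cases hv : val < lim
    · -- loop body runs: there is a positive maximum
      have hsp : 0 < pvSumPos work := by omega
      obtain ⟨x, hxW, hxpos⟩ := pvSumPos_pos_exists hsp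
      have hne : work ≠ [] := by rintro rfl; simp at hxW
      obtain ⟨m, hmax⟩ : ∃ m, PySem.List.max? work (fun x => x) = some m := by
        cases hmx : PySem.List.max? work (fun x => x) with
        | none => exact absurd ((PySem.List.max?_eq_none_iff _ _).mp hmx) hne
        | some m => exact ⟨m, rfl⟩
      have hmW : m ∈ work := PySem.List.max?_mem hmax
      have hmpos : 0 < m := lt_of_lt_of_le hxpos (PySem.List.max?_isMax hmax x hxW)
      rw [pvSortedDesc_step hmax, pvLoopA_cons hv, pvLoopB_step hv hmax]
      apply ih
      · have := work.length_erase_of_mem hmW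
        have : 0 < work.length := List.length_pos_iff.mpr hne
        omega
      · rw [pvSumPos_erase hmW hmpos]; omega
    · rw [pvLoopA_stop hv, pvLoopB_stop hv]

-- ===== VERDICT (by name: the statement is the Claim_ definition above) =====
theorem n_to_exceed_spec : Claim_equal_n_to_exceed := by
  intro vals lim _ hpre
  unfold Spec_n_to_exceed n_to_exceed n_to_exceed_alt
  rcases hpre with h | h
  · have hnv : ¬ (0:Int) < lim := by omega
    rw [pvLoopA_stop hnv, pvLoopB_stop hnv]
  · exact pvLoop_eq lim vals.length vals 0 0 le_rfl (by simpa [pvSumPos] using h)
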